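-- pv_equiv track=rewrite | github.com/Wroblewski-Patryk/LuckySparrow | backend/scripts/generate_project_status_dashboard.py | current_phase
-- ===== SOURCE A (Python) =====
-- from collections import Counter
--
-- def bucket(row: dict[str, str]) -> str:
--     return str(row.get("Readiness bucket", "")).strip() or "UNKNOWN"
--
-- def current_phase(rows: list[dict[str, str]]) -> str:
--     counts = Counter(bucket(row) for row in rows)
--     if counts.get("V1_BLOCKER", 0):
--         return "architecture evidence hardening with external blocker"
--     if counts.get("IMPLEMENTED_NEEDS_EVIDENCE", 0):
--         return "architecture evidence hardening"
--     if counts.get("IMPLEMENTED_NOT_VERIFIED", 0):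
--         return "architecture evidence hardening"
--     if counts.get("DEFERRED", 0):
--         return "architecture complete for selected scope with deferred extensions"
--     return "architecture implementation ready for release preservation"
-- ===== SOURCE B (Python) =====
-- _RANK = {
--     "V1_BLOCKER": 0,
--     "IMPLEMENTED_NEEDS_EVIDENCE": 1,
--     "IMPLEMENTED_NOT_VERIFIED": 2,
--     "DEFERRED": 3,
-- }
-- _PHASE = [
--     "architecture evidence hardening with external blocker",
--     "architecture evidence hardening",
--     "architecture evidence hardening",
--     "architecture complete for selected scope with deferred extensions",
--     "architecture implementation ready for release preservation",
-- ]
--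
-- def current_phase(rows: list[dict[str, str]]) -> str:
--     best = 4
--     for row in rows:
--         b = str(row.get("Readiness bucket", "")).strip() or "UNKNOWN"
--         best = min(best, _RANK.get(b, 4))
--     return _PHASE[best]
-- ===== Notes on version B (the rewrite author's own statement) =====
-- stated objective: alternative
-- what changed: Replaces the Counter build plus ordered presence checks with a single fold that tracks the minimum priority rank of the buckets seen and indexes a phase table at the end.
import Mathlib
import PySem

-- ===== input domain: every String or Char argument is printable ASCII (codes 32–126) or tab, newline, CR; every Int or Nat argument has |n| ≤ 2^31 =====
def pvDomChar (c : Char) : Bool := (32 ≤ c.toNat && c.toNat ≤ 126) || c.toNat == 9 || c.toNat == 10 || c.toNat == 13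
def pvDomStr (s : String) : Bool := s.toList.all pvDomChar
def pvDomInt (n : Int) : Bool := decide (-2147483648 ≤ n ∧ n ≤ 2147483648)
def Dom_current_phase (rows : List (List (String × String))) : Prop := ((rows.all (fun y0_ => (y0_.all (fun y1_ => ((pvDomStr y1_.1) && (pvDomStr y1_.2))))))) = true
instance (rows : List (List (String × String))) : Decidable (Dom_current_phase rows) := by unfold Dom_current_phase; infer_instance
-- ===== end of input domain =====

-- B replaces Counter + ordered presence checks with a single min-rank fold and a phase table (alternative decomposition, same cost).

-- ===== PORT A =====
-- bucket(row): str(row.get("Readiness bucket", "")).strip() or "UNKNOWN"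
def pvBucket (row : List (String × String)) : String :=
  let s := PySem.Str.strip ((PySem.Dict.mk row).getD "Readiness bucket" "")
  if s = "" then "UNKNOWN" else s

def current_phase (rows : List (List (String × String))) : String :=
  let counts := PySem.Dict.counter (rows.map pvBucket)
  if counts.getD "V1_BLOCKER" 0 ≠ 0 then
    "architecture evidence hardening with external blocker"
  else if counts.getD "IMPLEMENTED_NEEDS_EVIDENCE" 0 ≠ 0 then
    "architecture evidence hardening"
  else if counts.getD "IMPLEMENTED_NOT_VERIFIED" 0 ≠ 0 then
    "architecture evidence hardening"
  else if counts.getD "DEFERRED" 0 ≠ 0 then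
    "architecture complete for selected scope with deferred extensions"
  else
    "architecture implementation ready for release preservation"

-- ===== PORT B =====
-- _RANK.get(b, 4) on the literal dict (first-match lookup over the literal's keys)
def pvRank (b : String) : Int :=
  if b = "V1_BLOCKER" then 0
  else if b = "IMPLEMENTED_NEEDS_EVIDENCE" then 1
  else if b = "IMPLEMENTED_NOT_VERIFIED" then 2
  else if b = "DEFERRED" then 3
  else 4

def pvPhases : List String :=
  [ "architecture evidence hardening with external blocker"
  , "architecture evidence hardening"
  , "architecture evidence hardening"
  , "architecture complete for selected scope with deferred extensions"
  , "architecture implementation ready for release preservation" ]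

def current_phase_alt (rows : List (List (String × String))) : String :=
  let best := rows.foldl (fun best row => min best (pvRank (pvBucket row))) 4
  PySem.List.pyGetD pvPhases best ""

-- ===== PRECONDITION & SPEC =====
def Spec_current_phase (rows : List (List (String × String))) (out : String) : Prop := out = current_phase_alt rows
instance (rows : List (List (String × String))) (out : String) : Decidable (Spec_current_phase rows out) := by unfold Spec_current_phase; infer_instance

-- ===== CLAIM (what is proved, stated in full; the proofs are below) =====
def Claim_equal_current_phase : Prop := ∀ (rows : List (List (String × String))), Dom_current_phase rows → Spec_current_phase rows (current_phase rows)

-- ===== LEMMAS AND PROOFS =====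

-- the ordered-presence characterisation of the minimum rank among a bucket list
def pvChain (bs : List String) : Int :=
  if "V1_BLOCKER" ∈ bs then 0
  else if "IMPLEMENTED_NEEDS_EVIDENCE" ∈ bs then 1
  else if "IMPLEMENTED_NOT_VERIFIED" ∈ bs then 2
  else if "DEFERRED" ∈ bs then 3
  else 4

theorem pvChain_le (bs : List String) : pvChain bs ≤ 4 := by
  unfold pvChain; split_ifs <;> omega

theorem pvChain_cons (b : String) (bs : List String) :
    pvChain (b :: bs) = min (pvRank b) (pvChain bs) := by
  by_cases h0 : b = "V1_BLOCKER"
  · subst h0; simp [pvChain, pvRank, List.mem_cons, min_def]; split_ifs <;> omega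
  by_cases h1 : b = "IMPLEMENTED_NEEDS_EVIDENCE"
  · subst h1; simp [pvChain, pvRank, List.mem_cons, min_def]; split_ifs <;> omega
  by_cases h2 : b = "IMPLEMENTED_NOT_VERIFIED"
  · subst h2; simp [pvChain, pvRank, List.mem_cons, min_def]; split_ifs <;> omega
  by_cases h3 : b = "DEFERRED"
  · subst h3; simp [pvChain, pvRank, List.mem_cons, min_def]; split_ifs <;> omega
  have h0' : ¬("V1_BLOCKER" = b) := fun h => h0 h.symm
  have h1' : ¬("IMPLEMENTED_NEEDS_EVIDENCE" = b) := fun h => h1 h.symm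
  have h2' : ¬("IMPLEMENTED_NOT_VERIFIED" = b) := fun h => h2 h.symm
  have h3' : ¬("DEFERRED" = b) := fun h => h3 h.symm
  simp [pvChain, pvRank, List.mem_cons, min_def, h0, h1, h2, h3, h0', h1', h2', h3']
  split_ifs <;> omega

theorem pv_fold_eq_chain (rows : List (List (String × String))) (a : Int) (ha : a ≤ 4) :
    rows.foldl (fun best row => min best (pvRank (pvBucket row))) a
      = min a (pvChain (rows.map pvBucket)) := by
  induction rows generalizing a with
  | nil => simp [pvChain, min_def]; omega
  | cons r rs ih =>
      have hr : pvRank (pvBucket r) ≤ 4 := by unfold pvRank; split_ifs <;> omega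
      have := ih (min a (pvRank (pvBucket r))) (by omega)
      simp only [List.foldl_cons, List.map_cons] at *
      rw [this, pvChain_cons, min_assoc]

-- ===== VERDICT (by name: the statement is the Claim_ definition above) =====
theorem current_phase_spec : Claim_equal_current_phase := by
  intro rows _
  unfold Spec_current_phase current_phase current_phase_alt
  rw [pv_fold_eq_chain rows 4 (by omega)]
  have hmin : min (4 : Int) (pvChain (rows.map pvBucket)) = pvChain (rows.map pvBucket) := by
    have := pvChain_le (rows.map pvBucket); rw [min_def]; split_ifs <;> omega
  rw [hmin]
  simp only [PySem.Dict.getD_counter, ne_eq, Int.natCast_eq_zero, List.count_eq_zero]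
  unfold pvChain
  by_cases h0 : "V1_BLOCKER" ∈ rows.map pvBucket <;>
  by_cases h1 : "IMPLEMENTED_NEEDS_EVIDENCE" ∈ rows.map pvBucket <;>
  by_cases h2 : "IMPLEMENTED_NOT_VERIFIED" ∈ rows.map pvBucket <;>
  by_cases h3 : "DEFERRED" ∈ rows.map pvBucket <;>
  simp [h0, h1, h2, h3, pvPhases, PySem.List.pyGetD, PySem.List.pyGet?, PySem.List.pyIdx?]
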